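-- pv_equiv track=rewrite | github.com/MartinSirg/Python-Algkursus | EX08B/encoder.py | _correct_message
-- ===== SOURCE A (Python) =====
-- symbols = "/#$%^&*@0123456789"
--
-- def _correct_message(message: str) -> str:
--     """
--     Correct message.
--
--     Take out all the symbols between spaces, unless they are at the end or in the beginning.
--     Divide the message into three sections:
--     1.st section - symbols in the beginning of the word
--     2.nd section - text between beginning and end sections
--     3.rd section - symbols in the end
--     :param message:
--     :return:
--     """
--     msg_list = message.split()
--     new_list = []
--     for word in msg_list:
--         first_section = ""
--         last_section = ""
--         for i in range(len(word)):                      # Make first section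
--             if word[i] in symbols:
--                 first_section += word[i]
--             else:
--                 break
--         for i in range(len(word)):                      # Make last section
--             if word[-i - 1] in symbols:
--                 last_section = word[-i - 1] + last_section
--             else:
--                 break
--         if len(first_section) > 0:                      # Make middle section with word[index1: index2]
--             index1 = len(first_section)                 # Figure out index 1
--         else:
--             index1 = 0
--         index2 = len(word) - len(last_section)          # Figure out index 2
--         middle_section = word[index1:index2]            # Define middle section
--         new_mid = ""                                    # Soon to be corrected middle section
--         for i in range(len(middle_section)):            # Loop through middle
--             if middle_section[i] not in symbols:        # Take out all given symbols
--                 new_mid += middle_section[i]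
--         if first_section == last_section and len(new_mid) == 0:     # Exception for when a word consists of only symbols
--             result_word = first_section
--         else:
--             result_word = first_section + new_mid + last_section    # Final result of a new word under normal cond.
--         new_list.append(result_word)                                # Add new word to list
--     return " ".join(new_list)                                       # Join the list together
-- ===== SOURCE B (Python) =====
-- symbols = "/#$%^&*@0123456789"
--
-- def _correct_message(message: str) -> str:
--     """Single-pass state machine per word: emit the leading symbol run and
--     every non-symbol; buffer symbol runs after the first non-symbol and keep
--     the buffer only if the word ends with it (trailing run)."""
--     words = []
--     for word in message.split():
--         out = []
--         pending = []
--         seen = False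
--         for ch in word:
--             if ch in symbols:
--                 if seen:
--                     pending.append(ch)
--                 else:
--                     out.append(ch)
--             else:
--                 seen = True
--                 pending = []
--                 out.append(ch)
--         out.extend(pending)
--         words.append("".join(out))
--     return " ".join(words)
-- ===== Notes on version B (the rewrite author's own statement) =====
-- stated objective: alternative
-- what changed: Replaces A's three index scans per word (leading run, trailing run via negative indexing, slice-and-filter middle) plus an all-symbol special case with one left-to-right pass per word maintaining a seen-nonsymbol flag and a pending buffer that is flushed only at word end.
import Mathlib
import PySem

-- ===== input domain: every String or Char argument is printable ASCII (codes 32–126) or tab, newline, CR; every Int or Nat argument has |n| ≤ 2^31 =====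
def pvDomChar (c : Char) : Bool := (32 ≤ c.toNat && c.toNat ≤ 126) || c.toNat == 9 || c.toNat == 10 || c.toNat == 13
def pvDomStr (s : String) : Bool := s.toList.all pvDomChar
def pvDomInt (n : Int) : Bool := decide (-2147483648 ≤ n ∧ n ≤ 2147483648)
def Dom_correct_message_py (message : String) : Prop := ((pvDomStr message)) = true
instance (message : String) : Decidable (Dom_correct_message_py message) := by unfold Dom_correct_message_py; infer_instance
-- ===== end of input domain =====

-- B replaces A's three scans per word (leading run, trailing run, filtered middle slice)
-- with a single left-to-right pass holding a seen/pending state; same cost, different decomposition.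

def pvSymbols : List Char := "/#$%^&*@0123456789".toList

-- ===== PORT A =====
-- 'for i in range(len(word)): if word[i] in symbols: first_section += word[i] else: break'
def pvAFirst (w : List Char) (i : Nat) (acc : List Char) : List Char :=
  if i < w.length then
    match PySem.List.pyGet? w (i : Int) with
    | some c => if c ∈ pvSymbols then pvAFirst w (i + 1) (acc ++ [c]) else acc
    | none => acc
  else acc
termination_by w.length - i

-- 'for i in range(len(word)): if word[-i-1] in symbols: last_section = word[-i-1] + last_section else: break'
def pvALast (w : List Char) (i : Nat) (acc : List Char) : List Char :=
  if i < w.length then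
    match PySem.List.pyGet? w (-(i : Int) - 1) with
    | some c => if c ∈ pvSymbols then pvALast w (i + 1) (c :: acc) else acc
    | none => acc
  else acc
termination_by w.length - i

-- 'for i in range(len(middle_section)): if middle_section[i] not in symbols: new_mid += middle_section[i]'
def pvAMid (m : List Char) (i : Nat) (acc : List Char) : List Char :=
  if i < m.length then
    match PySem.List.pyGet? m (i : Int) with
    | some c => pvAMid m (i + 1) (if c ∈ pvSymbols then acc else acc ++ [c])
    | none => pvAMid m (i + 1) acc
  else acc
termination_by m.length - i

def pvAWord (w : List Char) : List Char :=
  let firstSection := pvAFirst w 0 []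
  let lastSection := pvALast w 0 []
  let index1 : Int := if firstSection.length > 0 then (firstSection.length : Int) else 0
  let index2 : Int := (w.length : Int) - (lastSection.length : Int)
  let middleSection := PySem.List.slice w (some index1) (some index2)
  let newMid := pvAMid middleSection 0 []
  if firstSection == lastSection && newMid.length == 0 then firstSection
  else firstSection ++ newMid ++ lastSection

def correct_message_py (message : String) : String :=
  let msgList := PySem.Str.split₀ message
  let newList := msgList.foldl (fun acc word => acc ++ [String.ofList (pvAWord word.toList)]) []
  PySem.Str.join " " newList

-- ===== PORT B =====
def pvBStep (st : List Char × List Char × Bool) (c : Char) : List Char × List Char × Bool :=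
  if c ∈ pvSymbols then
    if st.2.2 then (st.1, st.2.1 ++ [c], st.2.2)
    else (st.1 ++ [c], st.2.1, st.2.2)
  else (st.1 ++ [c], [], true)

def pvBWord (w : List Char) : List Char :=
  let st := w.foldl pvBStep ([], [], false)
  st.1 ++ st.2.1

def correct_message_py_alt (message : String) : String :=
  PySem.Str.join " " ((PySem.Str.split₀ message).map (fun word => String.ofList (pvBWord word.toList)))

-- ===== PRECONDITION & SPEC =====
def Spec_correct_message_py (message : String) (out : String) : Prop := out = correct_message_py_alt message
instance (message : String) (out : String) : Decidable (Spec_correct_message_py message out) := by unfold Spec_correct_message_py; infer_instance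

-- ===== CLAIM (what is proved, stated in full; the proofs are below) =====
def Claim_equal_correct_message_py : Prop := ∀ (message : String), Dom_correct_message_py message → Spec_correct_message_py message (correct_message_py message)

-- ===== LEMMAS AND PROOFS =====

def pvSym (c : Char) : Bool := c ∈ pvSymbols

theorem pvAFirst_eq (w : List Char) (i : Nat) (acc : List Char) :
    pvAFirst w i acc = acc ++ (w.drop i).takeWhile pvSym := by
  rw [pvAFirst]
  by_cases h : i < w.length
  · rw [if_pos h]
    have hg : PySem.List.pyGet? w (i : Int) = some w[i] := by
      simp [PySem.List.pyGet?_natCast, List.getElem?_eq_getElem h]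
    rw [hg, List.drop_eq_getElem_cons h, List.takeWhile_cons]
    dsimp only
    by_cases hc : w[i] ∈ pvSymbols
    · rw [if_pos hc, pvAFirst_eq w (i + 1) (acc ++ [w[i]])]
      simp [pvSym, hc]
    · rw [if_neg hc]
      simp [pvSym, hc]
  · rw [if_neg h]
    rw [List.drop_eq_nil_of_le (by omega)]
    simp
termination_by w.length - i

theorem pvALast_eq (w : List Char) (i : Nat) (acc : List Char) :
    pvALast w i acc = ((w.reverse.drop i).takeWhile pvSym).reverse ++ acc := by
  rw [pvALast]
  by_cases h : i < w.length
  · rw [if_pos h]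
    have hr : i < w.reverse.length := by simpa using h
    have hg : PySem.List.pyGet? w (-(i : Int) - 1) = some w.reverse[i] := by
      have : (-(i : Int) - 1) = -(((i + 1 : Nat)) : Int) := by push_cast; ring
      rw [this, PySem.List.pyGet?_neg_natCast w (i + 1) (by omega) (by omega)]
      rw [List.getElem?_eq_getElem (by omega)]
      congr 1
      rw [List.getElem_reverse]
      congr 1
      omega
    rw [hg, List.drop_eq_getElem_cons hr, List.takeWhile_cons]
    dsimp only
    by_cases hc : w.reverse[i] ∈ pvSymbols
    · rw [if_pos hc, pvALast_eq w (i + 1) (w.reverse[i] :: acc)]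
      simp only [List.getElem_reverse] at hc
      simp [pvSym, hc]
    · rw [if_neg hc]
      simp only [List.getElem_reverse] at hc
      simp [pvSym, hc]
  · rw [if_neg h]
    rw [List.drop_eq_nil_of_le (by simpa using (by omega : w.length ≤ i))]
    simp
termination_by w.length - i

theorem pvAMid_eq (m : List Char) (i : Nat) (acc : List Char) :
    pvAMid m i acc = acc ++ (m.drop i).filter (fun c => !pvSym c) := by
  rw [pvAMid]
  by_cases h : i < m.length
  · rw [if_pos h]
    have hg : PySem.List.pyGet? m (i : Int) = some m[i] := by
      simp [PySem.List.pyGet?_natCast, List.getElem?_eq_getElem h]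
    rw [hg, List.drop_eq_getElem_cons h, List.filter_cons]
    dsimp only
    rw [pvAMid_eq m (i + 1)]
    by_cases hc : m[i] ∈ pvSymbols
    · simp [pvSym, hc]
    · simp [pvSym, hc]
  · rw [if_neg h]
    rw [List.drop_eq_nil_of_le (by omega)]
    simp
termination_by m.length - i

def pvH (pending : List Char) : List Char → List Char
  | [] => pending
  | c :: t => if pvSym c then pvH (pending ++ [c]) t else c :: pvH [] t

theorem pvB_phase1 (l : List Char) (out : List Char) (h : ∀ x ∈ l, pvSym x = true) :
    l.foldl pvBStep (out, [], false) = (out ++ l, [], false) := by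
  induction l generalizing out with
  | nil => simp
  | cons c t ih =>
    have hc : c ∈ pvSymbols := by
      have := h c List.mem_cons_self
      simpa [pvSym] using this
    rw [List.foldl_cons]
    have hstep : pvBStep (out, [], false) c = (out ++ [c], [], false) := by
      simp [pvBStep, hc]
    rw [hstep, ih (out ++ [c]) (fun x hx => h x (List.mem_cons_of_mem c hx))]
    simp

theorem pvB_phase2 (l : List Char) (out pending : List Char) :
    (l.foldl pvBStep (out, pending, true)).1 ++ (l.foldl pvBStep (out, pending, true)).2.1
      = out ++ pvH pending l := by
  induction l generalizing out pending with
  | nil => simp [pvH]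
  | cons c t ih =>
    rw [List.foldl_cons, pvH]
    by_cases hc : c ∈ pvSymbols
    · have hstep : pvBStep (out, pending, true) c = (out, pending ++ [c], true) := by
        simp [pvBStep, hc]
      rw [hstep, ih out (pending ++ [c])]
      simp [pvSym, hc]
    · have hstep : pvBStep (out, pending, true) c = (out ++ [c], [], true) := by
        simp [pvBStep, hc]
      rw [hstep, ih (out ++ [c]) []]
      simp [pvSym, hc]

theorem pvTakeWhile_length_eq_iff (p : Char → Bool) (l : List Char) :
    (l.takeWhile p).length = l.length ↔ ∀ x ∈ l, p x = true := by
  constructor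
  · intro h
    have := (List.takeWhile_prefix (p := p) (l := l)).eq_of_length h
    exact List.takeWhile_eq_self_iff.mp this
  · intro h
    rw [List.takeWhile_eq_self_iff.mpr h]

theorem pvH_eq (l : List Char) (pending : List Char) :
    pvH pending l = if ∀ x ∈ l, pvSym x = true then pending ++ l
      else l.filter (fun c => !pvSym c) ++ (l.reverse.takeWhile pvSym).reverse := by
  induction l generalizing pending with
  | nil => simp [pvH]
  | cons c t ih =>
    rw [pvH]
    by_cases hc : pvSym c
    · rw [if_pos hc, ih]
      by_cases ht : ∀ x ∈ t, pvSym x = true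
      · rw [if_pos ht, if_pos (by intro x hx; rcases List.mem_cons.mp hx with h | h
                                  · exact h ▸ hc
                                  · exact ht x h)]
        simp
      · rw [if_neg ht, if_neg (by intro h; exact ht fun x hx => h x (List.mem_cons_of_mem c hx))]
        have htw : List.takeWhile pvSym (t.reverse ++ [c]) = List.takeWhile pvSym t.reverse := by
          rw [List.takeWhile_append, if_neg]
          intro hlen
          exact ht (by
            intro x hx
            exact (pvTakeWhile_length_eq_iff pvSym t.reverse).mp hlen x (by simpa using hx))
        simp [hc, htw]
    · have hcons : ¬ (∀ x ∈ c :: t, pvSym x = true) := by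
        intro h
        have h2 := h c List.mem_cons_self
        rw [h2] at hc
        exact hc rfl
      rw [if_neg hc, ih, if_neg hcons]
      by_cases ht : ∀ x ∈ t, pvSym x = true
      · rw [if_pos ht]
        have htw : List.takeWhile pvSym (t.reverse ++ [c]) = t.reverse := by
          rw [List.takeWhile_append, if_pos ((pvTakeWhile_length_eq_iff pvSym t.reverse).mpr
            (by intro x hx; exact ht x (by simpa using hx)))]
          simp [hc]
        have hftr : t.filter (fun c => !pvSym c) = [] :=
          List.filter_eq_nil_iff.mpr (by intro x hx; simp [ht x hx])
        simp [hc, htw, hftr]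
      · rw [if_neg ht]
        have htw : List.takeWhile pvSym (t.reverse ++ [c]) = List.takeWhile pvSym t.reverse := by
          rw [List.takeWhile_append, if_neg]
          intro hlen
          exact ht (by
            intro x hx
            exact (pvTakeWhile_length_eq_iff pvSym t.reverse).mp hlen x (by simpa using hx))
        simp [hc, htw]

theorem pvDropWhile_head_false (p : Char → Bool) (l : List Char) {c : Char} {u : List Char}
    (h : l.dropWhile p = c :: u) : p c = false := by
  induction l with
  | nil => simp [List.dropWhile] at h
  | cons a t ih =>
    rw [List.dropWhile_cons] at h
    by_cases ha : p a
    · rw [if_pos ha] at h; exact ih h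
    · rw [if_neg ha] at h
      cases h
      simpa using ha

theorem pvWord_all (w : List Char) (hall : ∀ x ∈ w, pvSym x = true) :
    pvAWord w = pvBWord w := by
  rw [pvAWord, pvBWord, pvAFirst_eq, pvALast_eq]
  simp only [List.drop_zero, List.append_nil, List.nil_append]
  have hfirst : w.takeWhile pvSym = w := List.takeWhile_eq_self_iff.mpr hall
  have hlast : w.reverse.takeWhile pvSym = w.reverse :=
    List.takeWhile_eq_self_iff.mpr (by intro x hx; exact hall x (by simpa using hx))
  rw [hfirst, hlast, List.reverse_reverse, pvB_phase1 w [] hall]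
  have hmid : ∀ a b : Int, 0 ≤ a → pvAMid (PySem.List.slice w (some a) (some b)) 0 []
      = (PySem.List.slice w (some a) (some b)).filter (fun c => !pvSym c) := by
    intro a b _
    rw [pvAMid_eq]
    simp
  by_cases hlen : w.length > 0
  · rw [if_pos hlen]
    have hsl : PySem.List.slice w (some (w.length : Int)) (some ((w.length : Int) - (w.length : Int))) = [] := by
      have : ((w.length : Int) - (w.length : Int)) = ((0 : Nat) : Int) := by push_cast; ring
      rw [this, PySem.List.slice_natCast]
      simp
    rw [hsl] at *
    rw [pvAMid_eq]
    simp
  · have hw : w = [] := by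
      cases w with
      | nil => rfl
      | cons a t => simp at hlen
    subst hw
    simp [pvAMid_eq, PySem.List.slice]

theorem pvWord_core (p : List Char) (c : Char) (u : List Char)
    (hp : ∀ x ∈ p, pvSym x = true) (hc : pvSym c = false) :
    pvAWord (p ++ c :: u) = pvBWord (p ++ c :: u) := by
  rw [pvAWord, pvBWord, pvAFirst_eq, pvALast_eq]
  simp only [List.drop_zero, List.append_nil, List.nil_append]
  have hplen : (List.takeWhile pvSym p).length = p.length :=
    (pvTakeWhile_length_eq_iff pvSym p).mpr hp
  have hfirst : (p ++ c :: u).takeWhile pvSym = p := by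
    rw [List.takeWhile_append, if_pos hplen, List.takeWhile_cons]
    simp [hc]
  have hidx1 : (if 0 < p.length then ((p.length : Nat) : Int) else 0) = ((p.length : Nat) : Int) := by
    split_ifs with h
    · rfl
    · have : p.length = 0 := by omega
      simp [this]
  have hrev : (p ++ c :: u).reverse = u.reverse ++ c :: p.reverse := by simp
  have hBfold : (p ++ c :: u).foldl pvBStep ([], [], false)
      = u.foldl pvBStep (p ++ [c], [], true) := by
    rw [List.foldl_append, pvB_phase1 p [] hp, List.foldl_cons]
    have : pvBStep (([] : List Char) ++ p, [], false) c = (p ++ [c], [], true) := by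
      simp [pvBStep, pvSym] at hc ⊢
      simp [hc]
    rw [this]
  by_cases hu : ∀ x ∈ u, pvSym x = true
  · -- trailing run is all of u
    have hlast : ((p ++ c :: u).reverse.takeWhile pvSym).reverse = u := by
      rw [hrev, List.takeWhile_append, if_pos ((pvTakeWhile_length_eq_iff pvSym u.reverse).mpr
        (by intro x hx; exact hu x (by simpa using hx)))]
      simp [hc]
    rw [hfirst, hlast, hidx1]
    have hidx2 : ((p ++ c :: u).length : Int) - (u.length : Int) = (((p.length + 1 : Nat)) : Int) := by
      simp
      ring
    rw [hidx2, PySem.List.slice_natCast]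
    have hsl : (List.drop p.length (p ++ c :: u)).take (p.length + 1 - p.length) = [c] := by
      rw [List.drop_left]
      have : p.length + 1 - p.length = 1 := by omega
      rw [this]
      rfl
    rw [hsl, pvAMid_eq]
    simp only [List.drop_zero, List.nil_append, List.filter_cons]
    rw [hBfold, pvB_phase2, pvH_eq, if_pos hu]
    simp [hc]
  · -- proper trailing run inside u
    have hune : ∃ d v, u.reverse.dropWhile pvSym = d :: v := by
      cases hdw : u.reverse.dropWhile pvSym with
      | nil =>
        exfalso
        apply hu
        have := List.takeWhile_append_dropWhile (p := pvSym) (l := u.reverse)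
        rw [hdw, List.append_nil] at this
        intro x hx
        exact List.takeWhile_eq_self_iff.mp this x (by simpa using hx)
      | cons d v => exact ⟨d, v, rfl⟩
    have hulen : ¬ ((u.reverse.takeWhile pvSym).length = u.reverse.length) := by
      intro hlen
      exact hu (by intro x hx
                   exact (pvTakeWhile_length_eq_iff pvSym u.reverse).mp hlen x (by simpa using hx))
    have hlast : ((p ++ c :: u).reverse.takeWhile pvSym).reverse
        = (u.reverse.takeWhile pvSym).reverse := by
      rw [hrev, List.takeWhile_append, if_neg hulen]
    set r : List Char := (u.reverse.takeWhile pvSym).reverse with hr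
    set u1 : List Char := (u.reverse.dropWhile pvSym).reverse with hu1
    have hudec : u = u1 ++ r := by
      rw [hu1, hr, ← List.reverse_append, List.takeWhile_append_dropWhile, List.reverse_reverse]
    have hrall : ∀ x ∈ r, pvSym x = true := by
      intro x hx
      exact List.mem_takeWhile_imp (by simpa [hr] using hx)
    rw [hfirst, hlast, hidx1]
    have hidx2 : ((p ++ c :: u).length : Int) - (r.length : Int)
        = (((p.length + 1 + u1.length : Nat)) : Int) := by
      have : u.length = u1.length + r.length := by rw [hudec]; simp
      simp [this]
      ring
    rw [hidx2, PySem.List.slice_natCast]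
    have hsl : (List.drop p.length (p ++ c :: u)).take (p.length + 1 + u1.length - p.length)
        = c :: u1 := by
      rw [List.drop_left]
      have h1 : p.length + 1 + u1.length - p.length = 1 + u1.length := by omega
      rw [h1, hudec]
      have : (1 + u1.length) = (c :: u1).length := by simp; omega
      rw [show c :: (u1 ++ r) = (c :: u1) ++ r by simp, this, List.take_left]
    rw [hsl, pvAMid_eq]
    simp only [List.drop_zero, List.nil_append, List.filter_cons]
    rw [hBfold, pvB_phase2, pvH_eq, if_neg hu]
    have hfr : r.filter (fun c => !pvSym c) = [] :=
      List.filter_eq_nil_iff.mpr (by intro x hx; simp [hrall x hx])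
    have hfu : u.filter (fun c => !pvSym c) = u1.filter (fun c => !pvSym c) := by
      rw [hudec, List.filter_append, hfr, List.append_nil]
    simp [hc, hfu]
    exact hr

theorem pvWord_eq (w : List Char) : pvAWord w = pvBWord w := by
  by_cases hall : ∀ x ∈ w, pvSym x = true
  · exact pvWord_all w hall
  · have hd : ∃ c u, w.dropWhile pvSym = c :: u := by
      cases hdw : w.dropWhile pvSym with
      | nil =>
        exfalso
        apply hall
        have := List.takeWhile_append_dropWhile (p := pvSym) (l := w)
        rw [hdw, List.append_nil] at this
        exact List.takeWhile_eq_self_iff.mp this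
      | cons c u => exact ⟨c, u, rfl⟩
    obtain ⟨c, u, hcu⟩ := hd
    have hw : w = w.takeWhile pvSym ++ c :: u := by
      conv_lhs => rw [← List.takeWhile_append_dropWhile (p := pvSym) (l := w)]
      rw [hcu]
    rw [hw]
    exact pvWord_core _ c u (fun x hx => List.mem_takeWhile_imp hx)
      (pvDropWhile_head_false pvSym w hcu)

-- ===== VERDICT (by name: the statement is the Claim_ definition above) =====
theorem correct_message_py_spec : Claim_equal_correct_message_py := by
  intro message _
  unfold Spec_correct_message_py correct_message_py correct_message_py_alt
  show PySem.Str.join " " (List.foldl (fun acc word => acc ++ [String.ofList (pvAWord word.toList)]) [] (PySem.Str.split₀ message)) = _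
  rw [PySem.List.foldl_append_singleton_eq_map]
  simp [pvWord_eq]
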